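-- pv_equiv track=rewrite | github.com/garytto/algorithm | 백준/Bronze/2798. 블랙잭/블랙잭.py | result
-- ===== SOURCE A (Python) =====
-- def result(n, m, number):
--     n_sum = 0
--
--     for i in range(n-2):
--         for j in range(i + 1, n - 1):
--             for k in range(j + 1, n):
--                 tmp = number[i] + number[j] + number[k]
--                 if n_sum < tmp <= m:
--                     n_sum = tmp
--                 if n_sum == m:
--                     return tmp
--
--     return n_sum
-- ===== SOURCE B (Python) =====
-- def result(n, m, number):
--     nums = number[:max(n, 0)]
--     # layers[j] = sums of all j-card subsequences of the suffix processed so far,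
--     # built back-to-front; layers[3] ends up holding every 3-card sum.
--     layers = [[0], [], [], []]
--     for x in reversed(nums):
--         for j in (3, 2, 1):
--             layers[j] = [x + s for s in layers[j - 1]] + layers[j]
--     return max((s for s in layers[3] if 0 < s <= m), default=0)
-- ===== Notes on version B (the rewrite author's own statement) =====
-- stated objective: alternative
-- what changed: Replaces A's three nested index loops with a running best and an early return by a back-to-front DP over suffixes (layer j = sums of all j-card subsequences) followed by a single filtered max.
-- intended difference: When m = 0 and n >= 3 with the first three cards not summing to 0, A's 'n_sum == m' test fires before any update and A returns the first triple's sum; B returns 0, the maximum over the (empty) set of positive triple sums <= 0, which is the intended value. — e.g. on result(3, 0, [1, 2, 3]): A returns 6, B returns 0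
-- outside the precondition, e.g. on result(6, 0, [-2, 14, 0]): A returns 12, B returns 0; on result(5, 10, [1, 2, 3]): A raises IndexError, B returns 6
import Mathlib
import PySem

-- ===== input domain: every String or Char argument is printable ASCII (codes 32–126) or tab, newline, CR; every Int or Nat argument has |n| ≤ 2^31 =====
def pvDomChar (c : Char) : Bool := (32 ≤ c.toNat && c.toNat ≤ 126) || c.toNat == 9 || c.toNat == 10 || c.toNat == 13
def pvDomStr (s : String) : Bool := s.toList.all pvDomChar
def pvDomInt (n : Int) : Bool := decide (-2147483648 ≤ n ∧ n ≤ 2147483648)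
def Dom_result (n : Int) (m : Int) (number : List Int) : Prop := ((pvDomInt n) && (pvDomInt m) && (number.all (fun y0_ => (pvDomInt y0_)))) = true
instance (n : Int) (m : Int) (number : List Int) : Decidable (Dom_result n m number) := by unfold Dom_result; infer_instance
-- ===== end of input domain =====

-- B replaces A's three nested index loops and early return by a back-to-front DP over the
-- suffixes (layer j = sums of j-card subsequences) followed by one filtered max (objective: alternative).

-- ===== PORT A =====
-- A-side helpers: the nested `for` loops; `Sum.inl v` models the early `return tmp`,
-- `Sum.inr b` the running n_sum at normal loop exit; number[·] is pyGetD (in range under Pre_).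
def resultKLoop (m : Int) (number : List Int) (i j : Int) : List Int → Int → Int ⊕ Int
  | [], b => .inr b
  | k :: ks, b =>
    let tmp := PySem.List.pyGetD number i 0 + PySem.List.pyGetD number j 0 +
      PySem.List.pyGetD number k 0
    let b' := if b < tmp ∧ tmp ≤ m then tmp else b
    if b' = m then .inl tmp else resultKLoop m number i j ks b'

def resultJLoop (n m : Int) (number : List Int) (i : Int) : List Int → Int → Int ⊕ Int
  | [], b => .inr b
  | j :: js, b =>
    match resultKLoop m number i j (PySem.List.pyRange (j + 1) n 1) b with
    | .inl v => .inl v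
    | .inr b' => resultJLoop n m number i js b'

def resultILoop (n m : Int) (number : List Int) : List Int → Int → Int ⊕ Int
  | [], b => .inr b
  | i :: is, b =>
    match resultJLoop n m number i (PySem.List.pyRange (i + 1) (n - 1) 1) b with
    | .inl v => .inl v
    | .inr b' => resultILoop n m number is b'

def result (n : Int) (m : Int) (number : List Int) : Int :=
  match resultILoop n m number (PySem.List.pyRange 0 (n - 2) 1) 0 with
  | .inl v => v
  | .inr b => b

-- ===== PORT B =====
-- one pass of `for j in (3, 2, 1)` over the 4-entry table; each layers[j] reads the
-- pre-update layers[j-1] because the updates run in the order 3, 2, 1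
def resultAltStep (ly : List Int × List Int × List Int × List Int) (x : Int) :
    List Int × List Int × List Int × List Int :=
  let l3' := ly.2.2.1.map (fun s => x + s) ++ ly.2.2.2
  let l2' := ly.2.1.map (fun s => x + s) ++ ly.2.2.1
  let l1' := ly.1.map (fun s => x + s) ++ ly.2.1
  (ly.1, l1', l2', l3')

def result_alt (n : Int) (m : Int) (number : List Int) : Int :=
  let nums := PySem.List.slice number none (some (max n 0))
  let layers := nums.reverse.foldl resultAltStep ([0], [], [], [])
  (PySem.List.max? (layers.2.2.2.filter (fun s => decide (0 < s ∧ s ≤ m))) (fun s => s)).getD 0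

-- ===== PRECONDITION & SPEC =====
-- Pre_ excludes n > len(number), a card count inconsistent with the list: there A raises
-- IndexError, except when its early return happens to fire on a triple of the first two cards
-- before the out-of-range access — an accident of scan order on malformed input.
def Pre_result (n : Int) (m : Int) (number : List Int) : Prop :=
  3 ≤ n → n ≤ (number.length : Int)
instance (n : Int) (m : Int) (number : List Int) : Decidable (Pre_result n m number) := by
  unfold Pre_result; infer_instance
def pvWitness_result : Int × Int × List Int := (3, 10, [5, 1, 2])

-- On inputs with n ≥ 3 and m = 0 whose first three cards do not sum to 0, A's `n_sum == m`
-- test fires before any update and A returns the first triple's sum; B returns 0, the maximum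
-- over the (empty) set of positive triple sums ≤ 0, which is the intended value.
def D_result (n : Int) (m : Int) (number : List Int) : Prop :=
  m = 0 ∧ 3 ≤ n ∧ (number.take 3).sum ≠ 0
instance (n : Int) (m : Int) (number : List Int) : Decidable (D_result n m number) := by
  unfold D_result; infer_instance

def Spec_result (n : Int) (m : Int) (number : List Int) (out : Int) : Prop :=
  ¬ D_result n m number → out = result_alt n m number
instance (n : Int) (m : Int) (number : List Int) (out : Int) : Decidable (Spec_result n m number out) := by
  unfold Spec_result; infer_instance

def pvDiffWitness_result : Int × Int × List Int := (3, 0, [1, 2, 3])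
def pvDiffWitnessOut_result : Int × Int := (6, 0)


-- ===== CLAIM (what is proved, stated in full; the proofs are below) =====
def Claim_unchanged_result : Prop := ∀ (n : Int) (m : Int) (number : List Int), Dom_result n m number → Pre_result n m number → Spec_result n m number (result n m number)
def Claim_changed_result : Prop := Dom_result (pvDiffWitness_result.1) (pvDiffWitness_result.2.1) (pvDiffWitness_result.2.2) ∧ Pre_result (pvDiffWitness_result.1) (pvDiffWitness_result.2.1) (pvDiffWitness_result.2.2) ∧ D_result (pvDiffWitness_result.1) (pvDiffWitness_result.2.1) (pvDiffWitness_result.2.2) ∧ result (pvDiffWitness_result.1) (pvDiffWitness_result.2.1) (pvDiffWitness_result.2.2) = pvDiffWitnessOut_result.1 ∧ result_alt (pvDiffWitness_result.1) (pvDiffWitness_result.2.1) (pvDiffWitness_result.2.2) = pvDiffWitnessOut_result.2 ∧ pvDiffWitnessOut_result.1 ≠ pvDiffWitnessOut_result.2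
def Claim_exact_result : Prop := ∀ (n : Int) (m : Int) (number : List Int), Dom_result n m number → Pre_result n m number → D_result n m number → result n m number ≠ result_alt n m number

-- ===== LEMMAS AND PROOFS =====

-- the update A performs on its running n_sum
def stepU (m b t : Int) : Int := if b < t ∧ t ≤ m then t else b

-- sums of all k-element subsequences, in lexicographic order of positions
def subSums : List Int → Nat → List Int
  | _, 0 => [0]
  | [], _ + 1 => []
  | x :: r, k + 1 => (subSums r k).map (fun s => x + s) ++ subSums r (k + 1)
-- basic facts
theorem stepU_keep (m : Int) : ∀ l : List Int, List.foldl (stepU m) m l = m := by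
  intro l; induction l with
  | nil => rfl
  | cons t l ih => simp only [List.foldl_cons, stepU]; rw [if_neg (by omega)]; exact ih

theorem foldl_stepU (m : Int) : ∀ (S : List Int) (b : Int), 0 ≤ b →
    List.foldl (stepU m) b S = List.foldl max b (S.filter (fun s => decide (0 < s ∧ s ≤ m))) := by
  intro S; induction S with
  | nil => intro b _; rfl
  | cons t S ih =>
    intro b hb
    by_cases h : 0 < t ∧ t ≤ m
    · have : stepU m b t = max b t := by unfold stepU; split_ifs with h2 <;> omega
      simp only [List.foldl_cons, List.filter_cons, decide_eq_true h, this]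
      exact ih (max b t) (by omega)
    · have : stepU m b t = b := by unfold stepU; split_ifs with h2 <;> omega
      simp only [List.foldl_cons, List.filter_cons, this]
      rw [decide_eq_false h]
      exact ih b hb

theorem foldl_max_getD (l : List Int) (h : ∀ x ∈ l, 0 < x) :
    List.foldl max 0 l = (PySem.List.max? l (fun s => s)).getD 0 := by
  cases l with
  | nil => simp [PySem.List.max?]
  | cons x t =>
    rw [PySem.List.max?_id_cons]
    have hx : 0 < x := h x (by simp)
    simp only [List.foldl_cons, Option.getD_some]
    rw [max_eq_right hx.le]

theorem subSums_one : ∀ l : List Int, subSums l 1 = l := by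
  intro l; induction l with
  | nil => rfl
  | cons x r ih => simp [subSums, ih]

theorem subSums_nil_of_short : ∀ (l : List Int) (k : Nat), l.length < k → subSums l k = [] := by
  intro l; induction l with
  | nil => intro k hk; cases k with | zero => omega | succ k => rfl
  | cons x r ih =>
    intro k hk
    cases k with
    | zero => omega
    | succ k =>
      simp only [List.length_cons] at hk
      simp [subSums, ih k (by omega), ih (k+1) (by omega)]
theorem layers_spec : ∀ l : List Int,
    l.reverse.foldl resultAltStep ([0], [], [], []) =
      (subSums l 0, subSums l 1, subSums l 2, subSums l 3) := by
  intro l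
  rw [List.foldl_reverse]
  induction l with
  | nil => rfl
  | cons x r ih =>
    simp only [List.foldr_cons, ih]
    simp [resultAltStep, subSums]

theorem result_alt_char (n m : Int) (number : List Int) :
    result_alt n m number =
      (PySem.List.max? (((subSums (number.take (max n 0).toNat) 3).filter
        (fun s => decide (0 < s ∧ s ≤ m))) ) (fun s => s)).getD 0 := by
  show (PySem.List.max? ((((PySem.List.slice number none (some (max n 0))).reverse.foldl
      resultAltStep ([0], [], [], [])).2.2.2).filter (fun s => decide (0 < s ∧ s ≤ m)))
      (fun s => s)).getD 0 = _
  rw [PySem.List.slice_to number (b := max n 0) (by omega), layers_spec]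
theorem bridge2 (t : List Int) : ∀ (d a : Nat), a + d = t.length →
    ((PySem.List.pyRange (a : Int) ((t.length : Int) - 1)).flatMap (fun j =>
       (PySem.List.pyRange (j + 1) ((t.length : Int))).map (fun k =>
          PySem.List.pyGetD t j 0 + PySem.List.pyGetD t k 0)))
    = subSums (t.drop a) 2 := by
  intro d
  induction d with
  | zero =>
    intro a ha
    rw [PySem.List.pyRange_one_eq_nil (by omega)]
    rw [subSums_nil_of_short _ 2 (by simp; omega)]
    rfl
  | succ d ih =>
    intro a ha
    by_cases hd : d = 0
    · subst hd
      rw [PySem.List.pyRange_one_eq_nil (by omega)]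
      rw [subSums_nil_of_short _ 2 (by simp; omega)]
      rfl
    · have halen : a < t.length := by omega
      have hget : PySem.List.pyGetD t (a : Int) 0 = t[a] :=
        PySem.List.pyGetD_eq_getElem t 0 (by omega) (by omega)
      rw [PySem.List.pyRange_one_cons (by omega : (a : Int) < (t.length : Int) - 1),
        List.flatMap_cons,
        show ((a : Int) + 1) = ((a + 1 : Nat) : Int) from by push_cast; ring,
        ih (a + 1) (by omega)]
      have hm := PySem.List.map_pyGetD_pyRange t 0 (a := ((a + 1 : Nat) : Int)) (by omega)
      simp only [PySem.List.len_eq, Int.toNat_natCast] at hm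
      have hmap : (PySem.List.pyRange ((a + 1 : Nat) : Int) ((t.length : Int))).map
          (fun k => PySem.List.pyGetD t (a : Int) 0 + PySem.List.pyGetD t k 0)
          = (t.drop (a + 1)).map (fun s => t[a] + s) := by
        rw [← hm, List.map_map]
        apply List.map_congr_left
        intro k _
        simp [Function.comp, hget]
      rw [hmap, ← List.getElem_cons_drop halen]
      simp [subSums, subSums_one]
theorem bridge3 (t : List Int) : ∀ (d a : Nat), a + d = t.length →
    ((PySem.List.pyRange (a : Int) ((t.length : Int) - 2)).flatMap (fun i =>
      (PySem.List.pyRange (i + 1) ((t.length : Int) - 1)).flatMap (fun j =>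
        (PySem.List.pyRange (j + 1) ((t.length : Int))).map (fun k =>
          PySem.List.pyGetD t i 0 + PySem.List.pyGetD t j 0 + PySem.List.pyGetD t k 0))))
    = subSums (t.drop a) 3 := by
  intro d
  induction d with
  | zero =>
    intro a ha
    rw [PySem.List.pyRange_one_eq_nil (by omega)]
    rw [subSums_nil_of_short _ 3 (by simp; omega)]
    rfl
  | succ d ih =>
    intro a ha
    by_cases hd : d ≤ 1
    · rw [PySem.List.pyRange_one_eq_nil (by omega)]
      rw [subSums_nil_of_short _ 3 (by simp; omega)]
      rfl
    · have halen : a < t.length := by omega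
      have hget : PySem.List.pyGetD t (a : Int) 0 = t[a] :=
        PySem.List.pyGetD_eq_getElem t 0 (by omega) (by omega)
      rw [PySem.List.pyRange_one_cons (by omega : (a : Int) < (t.length : Int) - 2),
        List.flatMap_cons,
        show ((a : Int) + 1) = ((a + 1 : Nat) : Int) from by push_cast; ring,
        ih (a + 1) (by omega)]
      have hblock : ((PySem.List.pyRange ((a + 1 : Nat) : Int) ((t.length : Int) - 1)).flatMap
          (fun j => (PySem.List.pyRange (j + 1) ((t.length : Int))).map (fun k =>
            PySem.List.pyGetD t (a : Int) 0 + PySem.List.pyGetD t j 0 + PySem.List.pyGetD t k 0)))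
          = (subSums (t.drop (a + 1)) 2).map (fun s => t[a] + s) := by
        rw [← bridge2 t d (a + 1) (by omega), List.map_flatMap]
        apply List.flatMap_congr
        intro j _
        rw [List.map_map]
        apply List.map_congr_left
        intro k _
        simp [Function.comp, hget]
        ring
      rw [hblock, ← List.getElem_cons_drop halen]
      simp [subSums]
theorem kLoop_char (m : Int) (number : List Int) (i j : Int) :
    ∀ (ks : List Int) (b : Int), b ≠ m →
    resultKLoop m number i j ks b =
      (if List.foldl (stepU m) b (ks.map (fun k => PySem.List.pyGetD number i 0 +
          PySem.List.pyGetD number j 0 + PySem.List.pyGetD number k 0)) = m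
       then .inl m
       else .inr (List.foldl (stepU m) b (ks.map (fun k => PySem.List.pyGetD number i 0 +
          PySem.List.pyGetD number j 0 + PySem.List.pyGetD number k 0)))) := by
  intro ks
  induction ks with
  | nil => intro b hb; simp [resultKLoop, hb]
  | cons k ks ih =>
    intro b hb
    simp only [resultKLoop, List.map_cons, List.foldl_cons]
    by_cases hb' : (if b < (PySem.List.pyGetD number i 0 + PySem.List.pyGetD number j 0 +
        PySem.List.pyGetD number k 0) ∧ (PySem.List.pyGetD number i 0 +
        PySem.List.pyGetD number j 0 + PySem.List.pyGetD number k 0) ≤ m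
        then (PySem.List.pyGetD number i 0 + PySem.List.pyGetD number j 0 +
          PySem.List.pyGetD number k 0) else b) = m
    · rw [if_pos hb']
      have htmp : (PySem.List.pyGetD number i 0 + PySem.List.pyGetD number j 0 +
          PySem.List.pyGetD number k 0) = m := by
        by_cases h : b < (PySem.List.pyGetD number i 0 + PySem.List.pyGetD number j 0 +
            PySem.List.pyGetD number k 0) ∧ (PySem.List.pyGetD number i 0 +
            PySem.List.pyGetD number j 0 + PySem.List.pyGetD number k 0) ≤ m
        · rw [if_pos h] at hb'; exact hb'
        · rw [if_neg h] at hb'; exact absurd hb' hb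
      have hstep : stepU m b (PySem.List.pyGetD number i 0 + PySem.List.pyGetD number j 0 +
          PySem.List.pyGetD number k 0) = m := hb'
      rw [hstep, stepU_keep, if_pos rfl, htmp]
    · rw [if_neg hb']
      have hstep : stepU m b (PySem.List.pyGetD number i 0 + PySem.List.pyGetD number j 0 +
          PySem.List.pyGetD number k 0) = (if b < (PySem.List.pyGetD number i 0 +
          PySem.List.pyGetD number j 0 + PySem.List.pyGetD number k 0) ∧
          (PySem.List.pyGetD number i 0 + PySem.List.pyGetD number j 0 +
          PySem.List.pyGetD number k 0) ≤ m then (PySem.List.pyGetD number i 0 +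
          PySem.List.pyGetD number j 0 + PySem.List.pyGetD number k 0) else b) := rfl
      rw [hstep]
      exact ih _ hb'
theorem jLoop_char (n m : Int) (number : List Int) (i : Int) :
    ∀ (js : List Int) (b : Int), b ≠ m →
    resultJLoop n m number i js b =
      (if List.foldl (stepU m) b (js.flatMap (fun j =>
          (PySem.List.pyRange (j + 1) n).map (fun k => PySem.List.pyGetD number i 0 +
            PySem.List.pyGetD number j 0 + PySem.List.pyGetD number k 0))) = m
       then .inl m
       else .inr (List.foldl (stepU m) b (js.flatMap (fun j =>
          (PySem.List.pyRange (j + 1) n).map (fun k => PySem.List.pyGetD number i 0 +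
            PySem.List.pyGetD number j 0 + PySem.List.pyGetD number k 0))))) := by
  intro js
  induction js with
  | nil => intro b hb; simp [resultJLoop, hb]
  | cons j js ih =>
    intro b hb
    simp only [resultJLoop, List.flatMap_cons, List.foldl_append]
    rw [kLoop_char m number i j _ b hb]
    by_cases hf : List.foldl (stepU m) b ((PySem.List.pyRange (j + 1) n).map
        (fun k => PySem.List.pyGetD number i 0 + PySem.List.pyGetD number j 0 +
          PySem.List.pyGetD number k 0)) = m
    · rw [if_pos hf, hf, stepU_keep, if_pos rfl]
    · rw [if_neg hf]
      exact ih _ hf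

theorem iLoop_char (n m : Int) (number : List Int) :
    ∀ (is : List Int) (b : Int), b ≠ m →
    resultILoop n m number is b =
      (if List.foldl (stepU m) b (is.flatMap (fun i =>
          (PySem.List.pyRange (i + 1) (n - 1)).flatMap (fun j =>
            (PySem.List.pyRange (j + 1) n).map (fun k => PySem.List.pyGetD number i 0 +
              PySem.List.pyGetD number j 0 + PySem.List.pyGetD number k 0)))) = m
       then .inl m
       else .inr (List.foldl (stepU m) b (is.flatMap (fun i =>
          (PySem.List.pyRange (i + 1) (n - 1)).flatMap (fun j =>
            (PySem.List.pyRange (j + 1) n).map (fun k => PySem.List.pyGetD number i 0 +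
              PySem.List.pyGetD number j 0 + PySem.List.pyGetD number k 0)))))) := by
  intro is
  induction is with
  | nil => intro b hb; simp [resultILoop, hb]
  | cons i is ih =>
    intro b hb
    simp only [resultILoop, List.flatMap_cons, List.foldl_append]
    rw [jLoop_char n m number i _ b hb]
    by_cases hf : List.foldl (stepU m) b ((PySem.List.pyRange (i + 1) (n - 1)).flatMap
        (fun j => (PySem.List.pyRange (j + 1) n).map
          (fun k => PySem.List.pyGetD number i 0 + PySem.List.pyGetD number j 0 +
            PySem.List.pyGetD number k 0))) = m
    · rw [if_pos hf, hf, stepU_keep, if_pos rfl]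
    · rw [if_neg hf]
      exact ih _ hf

theorem result_char (n m : Int) (number : List Int) (hm : m ≠ 0) :
    result n m number =
      List.foldl (stepU m) 0 ((PySem.List.pyRange 0 (n - 2)).flatMap (fun i =>
        (PySem.List.pyRange (i + 1) (n - 1)).flatMap (fun j =>
          (PySem.List.pyRange (j + 1) n).map (fun k => PySem.List.pyGetD number i 0 +
            PySem.List.pyGetD number j 0 + PySem.List.pyGetD number k 0)))) := by
  unfold result
  rw [iLoop_char n m number _ 0 (by omega)]
  by_cases hf : List.foldl (stepU m) 0 ((PySem.List.pyRange 0 (n - 2)).flatMap (fun i =>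
      (PySem.List.pyRange (i + 1) (n - 1)).flatMap (fun j =>
        (PySem.List.pyRange (j + 1) n).map (fun k => PySem.List.pyGetD number i 0 +
          PySem.List.pyGetD number j 0 + PySem.List.pyGetD number k 0)))) = m
  · rw [if_pos hf, hf]
  · rw [if_neg hf]
theorem getD_take_eq (number : List Int) (n x : Int) (h0 : 0 ≤ x) (hx : x < n)
    (hle : n ≤ (number.length : Int)) :
    PySem.List.pyGetD number x 0 = PySem.List.pyGetD (number.take n.toNat) x 0 := by
  have hlt : x < (number.length : Int) := lt_of_lt_of_le hx hle
  have hlen : (number.take n.toNat).length = n.toNat := by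
    simp [List.length_take]; omega
  rw [PySem.List.pyGetD_eq_getElem number 0 h0 hlt,
    PySem.List.pyGetD_eq_getElem (number.take n.toNat) 0 h0 (by rw [hlen]; omega)]
  rw [List.getElem_take]

theorem sums_congr (n : Int) (number : List Int) (hle : n ≤ (number.length : Int)) :
    ((PySem.List.pyRange 0 (n - 2)).flatMap (fun i =>
      (PySem.List.pyRange (i + 1) (n - 1)).flatMap (fun j =>
        (PySem.List.pyRange (j + 1) n).map (fun k => PySem.List.pyGetD number i 0 +
          PySem.List.pyGetD number j 0 + PySem.List.pyGetD number k 0))))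
    = ((PySem.List.pyRange 0 (n - 2)).flatMap (fun i =>
      (PySem.List.pyRange (i + 1) (n - 1)).flatMap (fun j =>
        (PySem.List.pyRange (j + 1) n).map (fun k =>
          PySem.List.pyGetD (number.take n.toNat) i 0 +
          PySem.List.pyGetD (number.take n.toNat) j 0 +
          PySem.List.pyGetD (number.take n.toNat) k 0)))) := by
  apply List.flatMap_congr
  intro i hi
  rw [PySem.List.mem_pyRange_one] at hi
  apply List.flatMap_congr
  intro j hj
  rw [PySem.List.mem_pyRange_one] at hj
  apply List.map_congr_left
  intro k hk
  rw [PySem.List.mem_pyRange_one] at hk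
  rw [getD_take_eq number n i (by omega) (by omega) hle,
    getD_take_eq number n j (by omega) (by omega) hle,
    getD_take_eq number n k (by omega) (by omega) hle]

theorem A_small (n m : Int) (number : List Int) (hn : n < 3) : result n m number = 0 := by
  unfold result
  rw [PySem.List.pyRange_one_eq_nil (by omega)]
  rfl

theorem B_small (n m : Int) (number : List Int) (hn : n < 3) : result_alt n m number = 0 := by
  rw [result_alt_char]
  rw [subSums_nil_of_short _ 3 (by simp [List.length_take]; omega)]
  simp [PySem.List.max?]

theorem B_mzero (n : Int) (number : List Int) : result_alt n 0 number = 0 := by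
  rw [result_alt_char]
  have : (subSums (number.take (max n 0).toNat) 3).filter (fun s => decide (0 < s ∧ s ≤ 0)) = [] := by
    rw [List.filter_eq_nil_iff]
    intro s _
    simp only [decide_eq_true_eq, not_and, not_le]
    omega
  rw [this]
  simp [PySem.List.max?]

theorem A_mzero (n : Int) (number : List Int) (hn : 3 ≤ n) :
    result n 0 number = PySem.List.pyGetD number 0 0 + PySem.List.pyGetD number 1 0 +
      PySem.List.pyGetD number 2 0 := by
  unfold result
  rw [PySem.List.pyRange_one_cons (by omega : (0 : Int) < n - 2)]
  simp only [resultILoop]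
  rw [show (0 : Int) + 1 = 1 from by ring, PySem.List.pyRange_one_cons (by omega : (1 : Int) < n - 1)]
  simp only [resultJLoop]
  rw [show (1 : Int) + 1 = 2 from by ring, PySem.List.pyRange_one_cons (by omega : (2 : Int) < n)]
  simp only [resultKLoop]
  rw [if_neg (by omega : ¬((0 : Int) < PySem.List.pyGetD number 0 0 +
    PySem.List.pyGetD number 1 0 + PySem.List.pyGetD number 2 0 ∧
    PySem.List.pyGetD number 0 0 + PySem.List.pyGetD number 1 0 +
    PySem.List.pyGetD number 2 0 ≤ 0))]
  simp

theorem take3_sum (number : List Int) (hlen : 3 ≤ number.length) :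
    PySem.List.pyGetD number 0 0 + PySem.List.pyGetD number 1 0 +
      PySem.List.pyGetD number 2 0 = (number.take 3).sum := by
  match number, hlen with
  | a :: b :: c :: rest, _ =>
    rw [PySem.List.pyGetD_zero_cons]
    rw [PySem.List.pyGetD_ofNat' _ 1 0, PySem.List.pyGetD_ofNat' _ 2 0]
    simp
    ring
theorem main_core (m : Int) (t : List Int) :
    List.foldl (stepU m) 0 ((PySem.List.pyRange 0 ((t.length : Int) - 2)).flatMap (fun i =>
      (PySem.List.pyRange (i + 1) ((t.length : Int) - 1)).flatMap (fun j =>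
        (PySem.List.pyRange (j + 1) (t.length : Int)).map (fun k =>
          PySem.List.pyGetD t i 0 + PySem.List.pyGetD t j 0 + PySem.List.pyGetD t k 0))))
    = (PySem.List.max? ((subSums t 3).filter (fun s => decide (0 < s ∧ s ≤ m)))
        (fun s => s)).getD 0 := by
  have hb := bridge3 t t.length 0 (by omega)
  simp only [Nat.cast_zero, List.drop_zero] at hb
  rw [hb, foldl_stepU m _ 0 le_rfl, foldl_max_getD]
  intro x hx
  rw [List.mem_filter] at hx
  have := hx.2
  simp only [decide_eq_true_eq] at this
  omega

theorem main_eq (n m : Int) (number : List Int) (hm : m ≠ 0) (hn : 3 ≤ n)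
    (hle : n ≤ (number.length : Int)) : result n m number = result_alt n m number := by
  obtain ⟨N, rfl⟩ : ∃ N : Nat, n = (N : Int) := ⟨n.toNat, by omega⟩
  have htlen : (number.take N).length = N := by
    simp [List.length_take]; omega
  rw [result_char _ m number hm, sums_congr _ number hle]
  simp only [Int.toNat_natCast]
  rw [show ((N : Nat) : Int) = ((number.take N).length : Int) from by rw [htlen]]
  rw [main_core m (number.take N)]
  rw [result_alt_char]
  have hmax : (max (((number.take N).length : Int)) 0).toNat = N := by
    rw [htlen]; omega
  rw [hmax]


-- ===== VERDICT (by name: the statements are the Claim_ definitions above) =====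
theorem result_spec : Claim_unchanged_result := by
  intro n m number _ hpre hnd
  unfold Pre_result at hpre
  unfold D_result at hnd
  show result n m number = result_alt n m number
  by_cases hm : m = 0
  · subst hm
    rw [B_mzero]
    by_cases hn : 3 ≤ n
    · have hlen3 : 3 ≤ number.length := by
        have := hpre hn; omega
      have hsum : (number.take 3).sum = 0 := by
        by_contra h
        exact hnd ⟨rfl, hn, h⟩
      rw [A_mzero n number hn, take3_sum number hlen3]
      exact hsum
    · exact A_small n 0 number (by omega)
  · by_cases hn : 3 ≤ n
    · exact main_eq n m number hm hn (hpre hn)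
    · rw [A_small n m number (by omega), B_small n m number (by omega)]

theorem result_tight : Claim_exact_result := by
  intro n m number _ hpre hd
  obtain ⟨hm0, hn3, hsum⟩ := hd
  subst hm0
  unfold Pre_result at hpre
  have hlen3 : 3 ≤ number.length := by have := hpre hn3; omega
  rw [A_mzero n number hn3, take3_sum number hlen3, B_mzero]
  exact hsum


theorem result_changed : Claim_changed_result := by unfold Claim_changed_result; decide
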